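-- pv_equiv track=rewrite | github.com/door2u/path | make/code/Math.py | ExprSepaEncl
-- ===== SOURCE A (Python) =====
-- def ExprSepaEncl(inde, variList):
-- 	encl = Encl(variList[inde])
-- 	# was a change to the list made
-- 	appe = False
-- 	while encl != None:
-- 		appe = True
-- 		variList[inde] = variList[inde].replace("(" + encl + ")", "@" + str(len(variList)), 1)
-- 		variList.append(encl)
-- 		encl = Encl(variList[inde])
-- 	return variList, appe
--
-- def Encl(stri):
-- 	retu = ""
-- 	pareCoun = 0
-- 	pareStar = False
-- 	star = 0
-- 	a = 0
-- 	while a < len(stri):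
-- 		if stri[a] == ")":
-- 			if pareCoun > 0:
-- 				pareCoun -= 1
-- 		if pareStar == True:
-- 			if pareCoun == 0:
-- 				retu = stri[star + 1:a]
-- 				pareStar = False
-- 				break
-- 		if stri[a] == "(":
-- 			pareCoun += 1
-- 			if pareStar == False:
-- 				star = a
-- 			pareStar = True
-- 		a += 1
-- 	if a == len(stri):
-- 		retu = None
-- 	return retu
-- ===== SOURCE B (Python) =====
-- def ExprSepaEncl(inde, variList):
-- 	# One left-to-right scan with a parenthesis-depth counter: copy depth-0 chars,
-- 	# collect each complete top-level group, substitute "@k" placeholders as we go.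
-- 	s = variList[inde]
-- 	out = []     # chars of the rewritten string
-- 	cur = []     # chars of the group currently being read (outer parens excluded)
-- 	groups = []
-- 	depth = 0
-- 	for c in s:
-- 		if depth == 0:
-- 			if c == "(":
-- 				depth = 1
-- 			else:
-- 				out.append(c)
-- 		elif c == "(":
-- 			depth += 1
-- 			cur.append(c)
-- 		elif c == ")":
-- 			depth -= 1
-- 			if depth == 0:
-- 				groups.append("".join(cur))
-- 				out.append("@" + str(len(variList) + len(groups) - 1))
-- 				cur = []
-- 			else:
-- 				cur.append(c)
-- 		else:
-- 			cur.append(c)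
-- 	if depth > 0:
-- 		out.append("(" + "".join(cur))
-- 	variList[inde] = "".join(out)
-- 	variList.extend(groups)
-- 	return variList, len(groups) > 0
-- ===== Notes on version B (the rewrite author's own statement) =====
-- stated objective: alternative
-- what changed: A repeatedly rescans and rewrites the string (find first group, str.replace, rescan from scratch) until no group is left; B makes a single left-to-right scan with a parenthesis-depth counter, copying depth-0 characters, collecting every complete top-level group and emitting its @k placeholder in one pass.
-- outside the precondition, e.g. on ExprSepaEncl(-1, ['((a))']): A returns (['@1', '@2', 'a'], True), B returns (['@1', '(a)'], True); on ExprSepaEncl(2, ['x']): A raises IndexError, B raises IndexError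
import Mathlib
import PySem

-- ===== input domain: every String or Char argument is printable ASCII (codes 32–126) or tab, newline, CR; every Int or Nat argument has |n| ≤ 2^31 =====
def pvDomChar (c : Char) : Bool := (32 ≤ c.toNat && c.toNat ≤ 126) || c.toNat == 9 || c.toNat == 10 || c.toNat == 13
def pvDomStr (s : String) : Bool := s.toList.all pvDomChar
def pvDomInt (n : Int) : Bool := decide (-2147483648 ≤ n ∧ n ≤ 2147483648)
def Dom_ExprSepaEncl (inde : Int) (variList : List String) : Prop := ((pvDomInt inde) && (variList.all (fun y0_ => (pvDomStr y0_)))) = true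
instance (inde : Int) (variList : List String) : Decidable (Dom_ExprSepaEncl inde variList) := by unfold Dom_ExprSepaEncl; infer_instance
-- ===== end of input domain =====

-- B replaces A's repeated rescan-and-replace loop by a single left-to-right depth-counter scan
-- (objective: alternative); both mutate variList in Python — equivalence is about the return value.

-- ===== PORT A =====
-- Encl's index-based while loop; the slice stri[star+1:a] is exact here since 0 ≤ star+1 ≤ a ≤ len.
def pvEnclGo (s : List Char) (pc : Nat) (ps : Bool) (star a : Nat) : Option (List Char) :=
  if h : a < s.length then
    -- pareCoun's in-place "-= 1" at a ')' is written out inline at each use below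
    if ps ∧ (if s[a] = ')' ∧ 0 < pc then pc - 1 else pc) = 0 then
      some ((s.drop (star + 1)).take (a - (star + 1)))
    else if s[a] = '(' then
      pvEnclGo s ((if s[a] = ')' ∧ 0 < pc then pc - 1 else pc) + 1) true
        (if ps then star else a) (a + 1)
    else pvEnclGo s (if s[a] = ')' ∧ 0 < pc then pc - 1 else pc) ps star (a + 1)
  else none
termination_by s.length - a

def pvEncl (stri : List Char) : Option (List Char) := pvEnclGo stri 0 false 0 0

-- str.replace(old, new, 1): rewrite the LEFTMOST occurrence of old (PySem.Chars.find finds it);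
-- hand-ported (PySem.Chars.replace has no count); exact for the nonempty old A always passes.
def pvReplaceFirst (s old new : List Char) : List Char :=
  let i := PySem.Chars.find s old
  if i = -1 then s else s.take i.toNat ++ new ++ s.drop (i.toNat + old.length)

-- A's while loop; fuel = count of '(' + 1 always suffices (each pass removes a '(' — proved below).
def pvExprLoop (fuel : Nat) (i : Nat) (vl : List String) (appe : Bool) : List String × Bool :=
  match fuel with
  | 0 => (vl, appe)
  | fuel + 1 =>
    let s := (vl.getD i "").toList
    match pvEncl s with
    | none => (vl, appe)
    | some encl =>
      pvExprLoop fuel i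
        ((vl.set i (String.ofList (pvReplaceFirst s ('(' :: (encl ++ [')']))
            ('@' :: PySem.Int.toChars (vl.length : Int))))) ++ [String.ofList encl]) true

-- Python resolves variList[inde]'s negative index against the CURRENT list length at each access;
-- it is resolved once here — exact on Pre_, where either inde ≥ 0 or the loop body never runs.
def ExprSepaEncl (inde : Int) (variList : List String) : List String × Bool :=
  if _h : 0 ≤ (if inde < 0 then inde + variList.length else inde) ∧
      (if inde < 0 then inde + variList.length else inde) < (variList.length : Int) then
    pvExprLoop
      ((variList.getD (if inde < 0 then inde + variList.length else inde).toNat "").toList.count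
          '(' + 1)
      (if inde < 0 then inde + variList.length else inde).toNat variList false
  else (variList, false)   -- Python raises IndexError (out of range)

-- ===== PORT B =====
-- Source B's single scan: state (depth, out, cur, groups), one step per character.
def pvBGo (n0 : Nat) (s : List Char) (depth : Nat) (out cur : List Char)
    (groups : List (List Char)) : List Char × List (List Char) :=
  match s with
  | [] => (if 0 < depth then out ++ '(' :: cur else out, groups)
  | c :: t =>
    if depth = 0 then
      if c = '(' then pvBGo n0 t 1 out cur groups
      else pvBGo n0 t 0 (out ++ [c]) cur groups
    else if c = '(' then pvBGo n0 t (depth + 1) out (cur ++ [c]) groups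
    else if c = ')' then
      if depth = 1 then
        pvBGo n0 t 0 (out ++ '@' :: PySem.Int.toChars ((n0 + groups.length : Nat) : Int))
          [] (groups ++ [cur])
      else pvBGo n0 t (depth - 1) out (cur ++ [c]) groups
    else pvBGo n0 t depth out (cur ++ [c]) groups

-- Source B reads and writes variList[inde] before extending, so its negative index is fixed-slot;
-- resolved once here (exact for every in-range inde).
def ExprSepaEncl_alt (inde : Int) (variList : List String) : List String × Bool :=
  if _h : 0 ≤ (if inde < 0 then inde + variList.length else inde) ∧
      (if inde < 0 then inde + variList.length else inde) < (variList.length : Int) then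
    let r := pvBGo variList.length
      (variList.getD (if inde < 0 then inde + variList.length else inde).toNat "").toList 0 [] [] []
    (variList.set (if inde < 0 then inde + variList.length else inde).toNat (String.ofList r.1) ++
        r.2.map String.ofList,
      decide (0 < r.2.length))
  else (variList, false)   -- Python raises IndexError (out of range)

-- ===== PRECONDITION & SPEC =====
-- Pre_ excludes inde outside [-len, len), where A raises IndexError, and negative in-range inde
-- whose element contains both '(' and ')': there A's per-access index re-resolution can make the
-- loop walk into other (even freshly appended) elements — an accidental corner no caller would
-- specify, on which B's fixed-slot value is as defensible as A's walk; negatives whose element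
-- lacks '(' or ')' (so no group exists and the loop never runs) stay inside.
def Pre_ExprSepaEncl (inde : Int) (variList : List String) : Prop :=
  (0 ≤ inde ∧ inde < (variList.length : Int)) ∨
  (inde < 0 ∧ 0 ≤ inde + variList.length ∧
    ('(' ∉ (variList.getD (inde + variList.length).toNat "").toList ∨
     ')' ∉ (variList.getD (inde + variList.length).toNat "").toList))
instance (inde : Int) (variList : List String) : Decidable (Pre_ExprSepaEncl inde variList) := by
  unfold Pre_ExprSepaEncl; infer_instance

def pvWitness_ExprSepaEncl : Int × List String := (0, ["(a)(b)"])

def Spec_ExprSepaEncl (inde : Int) (variList : List String) (out : List String × Bool) : Prop :=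
  out = ExprSepaEncl_alt inde variList
instance (inde : Int) (variList : List String) (out : List String × Bool) :
    Decidable (Spec_ExprSepaEncl inde variList out) := by unfold Spec_ExprSepaEncl; infer_instance

-- ===== CLAIM (what is proved, stated in full; the proofs are below) =====
def Claim_equal_ExprSepaEncl : Prop := ∀ (inde : Int) (variList : List String),
  Dom_ExprSepaEncl inde variList → Pre_ExprSepaEncl inde variList →
  Spec_ExprSepaEncl inde variList (ExprSepaEncl inde variList)

-- ===== LEMMAS AND PROOFS =====

-- proof-side spec: the first complete group. grab scans at depth d ≥ 1 for the closing ')';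
-- fgs skips to the first '(' and grabs.
def pvGrab (u : List Char) (d : Nat) : Option (List Char × List Char) :=
  match u with
  | [] => none
  | c :: t =>
    if c = ')' then
      if d = 1 then some ([], t)
      else (pvGrab t (d - 1)).map (fun x => (c :: x.1, x.2))
    else if c = '(' then (pvGrab t (d + 1)).map (fun x => (c :: x.1, x.2))
    else (pvGrab t d).map (fun x => (c :: x.1, x.2))

def pvFgs (t : List Char) : Option (List Char × List Char × List Char) :=
  match t with
  | [] => none
  | c :: u =>
    if c = '(' then (pvGrab u 1).map (fun x => ([], x.1, x.2))
    else (pvFgs u).map (fun x => (c :: x.1, x.2))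

theorem pvGrab_sound (u : List Char) : ∀ d g r, pvGrab u d = some (g, r) → u = g ++ ')' :: r := by
  induction u with
  | nil => intro d g r h; simp [pvGrab] at h
  | cons c t ih =>
    intro d g r h
    simp only [pvGrab] at h
    split_ifs at h with h1 h2
    · simp only [Option.some.injEq, Prod.mk.injEq] at h
      obtain ⟨rfl, rfl⟩ := h
      simp [h1]
    all_goals
      rw [Option.map_eq_some_iff] at h
      obtain ⟨⟨g1, r1⟩, hg, he⟩ := h
      simp only [Prod.mk.injEq] at he
      obtain ⟨rfl, rfl⟩ := he
      simp [ih _ _ _ hg]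


theorem pvFgs_sound (t : List Char) : ∀ p g r, pvFgs t = some (p, g, r) →
    t = p ++ '(' :: (g ++ ')' :: r) ∧ '(' ∉ p := by
  induction t with
  | nil => intro p g r h; simp [pvFgs] at h
  | cons c u ih =>
    intro p g r h
    simp only [pvFgs] at h
    split_ifs at h with h1
    · rw [Option.map_eq_some_iff] at h
      obtain ⟨⟨g1, r1⟩, hg, he⟩ := h
      simp only [Prod.mk.injEq] at he
      obtain ⟨rfl, rfl, rfl⟩ := he
      simpa [h1] using pvGrab_sound u 1 g1 r1 hg
    · rw [Option.map_eq_some_iff] at h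
      obtain ⟨⟨p1, g1, r1⟩, hg, he⟩ := h
      simp only [Prod.mk.injEq] at he
      obtain ⟨rfl, rfl, rfl⟩ := he
      obtain ⟨h2, h3⟩ := ih _ _ _ hg
      refine ⟨by simp [h2], ?_⟩
      simp only [List.mem_cons, not_or]
      exact ⟨fun hc => h1 hc.symm, h3⟩


theorem pvEnclGo_phase2 (s : List Char) : ∀ a star pc, star + 1 ≤ a → 1 ≤ pc →
    pvEnclGo s pc true star a =
      (pvGrab (s.drop a) pc).map (fun x => (s.drop (star + 1)).take (a - (star + 1)) ++ x.1) := by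
  suffices H : ∀ k a star pc, s.length - a ≤ k → star + 1 ≤ a → 1 ≤ pc →
      pvEnclGo s pc true star a =
      (pvGrab (s.drop a) pc).map (fun x => (s.drop (star + 1)).take (a - (star + 1)) ++ x.1) by
    intro a star pc h1 h2
    exact H (s.length - a) a star pc le_rfl h1 h2
  intro k
  induction k with
  | zero =>
    intro a star pc hk hsa hpc
    rw [pvEnclGo, dif_neg (by omega),
      List.drop_eq_nil_of_le (show s.length ≤ a from by omega)]
    simp [pvGrab]
  | succ k ihk =>
    intro a star pc hk hsa hpc
    by_cases h : a < s.length
    · have hdrop : s.drop a = s[a] :: s.drop (a + 1) := List.drop_eq_getElem_cons h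
      have htake : (s.drop (star + 1)).take (a + 1 - (star + 1)) =
          (s.drop (star + 1)).take (a - (star + 1)) ++ [s[a]] := by
        rw [show a + 1 - (star + 1) = (a - (star + 1)) + 1 from by omega, List.take_add_one,
          List.getElem?_drop, show star + 1 + (a - (star + 1)) = a from by omega,
          List.getElem?_eq_getElem h]
        simp
      rw [pvEnclGo, dif_pos h, hdrop, pvGrab]
      by_cases hc : s[a] = ')'
      · have hcnt : (if s[a] = ')' ∧ 0 < pc then pc - 1 else pc) = pc - 1 :=
          if_pos ⟨hc, by omega⟩
        rw [hcnt, if_pos hc]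
        by_cases hpc1 : pc = 1
        · subst hpc1
          rw [if_pos (show (true = true) ∧ 1 - 1 = 0 from by simp), if_pos rfl]
          simp
        · rw [if_neg (show ¬((true = true) ∧ pc - 1 = 0) from by simp; omega),
            if_neg (show ¬(s[a] = '(') from by rw [hc]; decide), if_neg hpc1,
            ihk (a + 1) star (pc - 1) (by omega) (by omega) (by omega), htake]
          cases pvGrab (s.drop (a + 1)) (pc - 1) <;> simp
      · have hcnt : (if s[a] = ')' ∧ 0 < pc then pc - 1 else pc) = pc :=
          if_neg (by simp [hc])
        rw [hcnt, if_neg (show ¬((true = true) ∧ pc = 0) from by simp; omega), if_neg hc]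
        by_cases hc2 : s[a] = '('
        · rw [if_pos hc2, if_pos hc2, if_pos (show true = true from rfl),
            ihk (a + 1) star (pc + 1) (by omega) (by omega) (by omega), htake]
          cases pvGrab (s.drop (a + 1)) (pc + 1) <;> simp
        · rw [if_neg hc2, if_neg hc2,
            ihk (a + 1) star pc (by omega) (by omega) hpc, htake]
          cases pvGrab (s.drop (a + 1)) pc <;> simp
    · rw [pvEnclGo, dif_neg h,
        List.drop_eq_nil_of_le (show s.length ≤ a from by omega)]
      simp [pvGrab]

theorem pvEnclGo_phase1 (s : List Char) : ∀ a star0,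
    pvEnclGo s 0 false star0 a = (pvFgs (s.drop a)).map (fun x => x.2.1) := by
  suffices H : ∀ k a star0, s.length - a ≤ k →
      pvEnclGo s 0 false star0 a = (pvFgs (s.drop a)).map (fun x => x.2.1) by
    intro a star0
    exact H (s.length - a) a star0 le_rfl
  intro k
  induction k with
  | zero =>
    intro a star0 hk
    rw [pvEnclGo, dif_neg (by omega),
      List.drop_eq_nil_of_le (show s.length ≤ a from by omega)]
    simp [pvFgs]
  | succ k ihk =>
    intro a star0 hk
    by_cases h : a < s.length
    · have hdrop : s.drop a = s[a] :: s.drop (a + 1) := List.drop_eq_getElem_cons h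
      have hcnt : (if s[a] = ')' ∧ 0 < 0 then 0 - 1 else 0) = 0 := if_neg (by simp)
      rw [pvEnclGo, dif_pos h, hdrop, pvFgs, hcnt,
        if_neg (show ¬((false = true) ∧ (0 : Nat) = 0) from by simp)]
      by_cases hc2 : s[a] = '('
      · rw [if_pos hc2, if_pos hc2, if_neg (show ¬(false = true) from by decide),
          Nat.zero_add, pvEnclGo_phase2 s (a + 1) a 1 (by omega) (by omega)]
        cases pvGrab (s.drop (a + 1)) 1 <;> simp
      · rw [if_neg hc2, if_neg hc2, ihk (a + 1) star0 (by omega)]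
        cases pvFgs (s.drop (a + 1)) <;> simp
    · rw [pvEnclGo, dif_neg h,
        List.drop_eq_nil_of_le (show s.length ≤ a from by omega)]
      simp [pvFgs]

theorem pvEncl_eq_fgs (s : List Char) : pvEncl s = (pvFgs s).map (fun x => x.2.1) := by
  rw [pvEncl, pvEnclGo_phase1 s 0 0, List.drop_zero]

theorem pvDigitChar_ne_paren (m : Nat) : Nat.digitChar m ≠ '(' := by
  match m with
  | 0 | 1 | 2 | 3 | 4 | 5 | 6 | 7 | 8 | 9 | 10 | 11 | 12 | 13 | 14 | 15 => decide
  | n + 16 =>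
    unfold Nat.digitChar
    repeat rw [if_neg (by omega)]
    decide


theorem pvToDigitsCore_no_paren : ∀ (f n : Nat) (acc : List Char),
    '(' ∉ acc → '(' ∉ Nat.toDigitsCore 10 f n acc := by
  intro f
  induction f with
  | zero => intro n acc h; simpa [Nat.toDigitsCore] using h
  | succ f ih =>
    intro n acc h
    simp only [Nat.toDigitsCore]
    split
    · simp only [List.mem_cons, not_or]
      exact ⟨fun hc => pvDigitChar_ne_paren _ hc.symm, h⟩
    · exact ih _ _ (by
        simp only [List.mem_cons, not_or]
        exact ⟨fun hc => pvDigitChar_ne_paren _ hc.symm, h⟩)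


theorem pvToChars_no_paren (n : Nat) : '(' ∉ PySem.Int.toChars (n : Int) := by
  simp only [PySem.Int.toChars]
  rw [if_neg (by omega)]
  exact pvToDigitsCore_no_paren _ _ _ (by simp)


theorem pvFind_decomp (p g r : List Char) (hp : '(' ∉ p) :
    PySem.Chars.find (p ++ ('(' :: (g ++ [')'])) ++ r) ('(' :: (g ++ [')'])) = (p.length : Int) := by
  have hinf : ('(' :: (g ++ [')'])) <:+: (p ++ ('(' :: (g ++ [')'])) ++ r) := ⟨p, r, rfl⟩
  have h0 : 0 ≤ PySem.Chars.find (p ++ ('(' :: (g ++ [')'])) ++ r) ('(' :: (g ++ [')'])) :=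
    (PySem.Chars.find_nonneg_iff _ _).mpr hinf
  obtain ⟨hpre, hmin⟩ := PySem.Chars.find_spec h0
  set f := PySem.Chars.find (p ++ ('(' :: (g ++ [')'])) ++ r) ('(' :: (g ++ [')'])) with hf
  have hdropP : (p ++ ('(' :: (g ++ [')'])) ++ r).drop p.length = ('(' :: (g ++ [')'])) ++ r := by
    rw [List.append_assoc, List.drop_left]
  have hle : f.toNat ≤ p.length := by
    by_contra hgt
    exact hmin p.length (by omega) (by rw [hdropP]; exact ⟨r, rfl⟩)
  have heq : f.toNat = p.length := by
    by_contra hne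
    have hlt : f.toNat < p.length := by omega
    obtain ⟨u, hu⟩ := hpre
    have hdp : List.drop f.toNat (p ++ '(' :: (g ++ [')']) ++ r) =
        List.drop f.toNat p ++ ('(' :: (g ++ [')']) ++ r) := by
      rw [List.append_assoc, List.drop_append_of_le_length (by omega)]
    have hdp2 : List.drop f.toNat p = p[f.toNat] :: List.drop (f.toNat + 1) p :=
      List.drop_eq_getElem_cons hlt
    rw [hdp, hdp2, List.cons_append] at hu
    rw [List.cons_append] at hu
    injection hu with hhd _
    exact hp (hhd ▸ List.getElem_mem hlt)
  omega


theorem pvReplaceFirst_decomp (p g r new : List Char) (hp : '(' ∉ p) :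
    pvReplaceFirst (p ++ '(' :: (g ++ ')' :: r)) ('(' :: (g ++ [')'])) new = p ++ new ++ r := by
  have hsplit : p ++ '(' :: (g ++ ')' :: r) = p ++ '(' :: (g ++ [')']) ++ r := by simp
  rw [pvReplaceFirst, hsplit, pvFind_decomp p g r hp]
  rw [if_neg (by omega)]
  have h1 : ((p.length : Int)).toNat = p.length := by omega
  have htake : List.take p.length (p ++ '(' :: (g ++ [')']) ++ r) = p := by
    rw [List.append_assoc]
    exact List.take_left
  have hdrop2 : List.drop (p.length + ('(' :: (g ++ [')'])).length)
      (p ++ '(' :: (g ++ [')']) ++ r) = r := by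
    rw [show p.length + ('(' :: (g ++ [')'])).length = (p ++ '(' :: (g ++ [')'])).length from by
      simp]
    exact List.drop_left
  rw [h1, htake, hdrop2, List.append_assoc]

theorem pvBGo_prefix (n0 : Nat) (p : List Char) : ∀ t out cur groups, '(' ∉ p →
    pvBGo n0 (p ++ t) 0 out cur groups = pvBGo n0 t 0 (out ++ p) cur groups := by
  induction p with
  | nil => intro t out cur groups _; simp
  | cons c q ih =>
    intro t out cur groups hp
    simp only [List.mem_cons, not_or] at hp
    rw [List.cons_append, pvBGo, if_pos rfl, if_neg (fun hc => hp.1 hc.symm),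
      ih _ _ _ _ hp.2]
    simp

theorem pvBGo_grab (n0 : Nat) (u : List Char) : ∀ d g r out cur groups, 1 ≤ d →
    pvGrab u d = some (g, r) →
    pvBGo n0 u d out cur groups =
      pvBGo n0 r 0 (out ++ '@' :: PySem.Int.toChars ((n0 + groups.length : Nat) : Int))
        [] (groups ++ [cur ++ g]) := by
  induction u with
  | nil => intro d g r out cur groups _ h; simp [pvGrab] at h
  | cons c t ih =>
    intro d g r out cur groups hd h
    rw [pvBGo, if_neg (by omega)]
    by_cases h1 : c = ')'
    · subst h1
      rw [if_neg (by decide), if_pos rfl]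
      rw [pvGrab, if_pos rfl] at h
      by_cases h2 : d = 1
      · subst h2
        rw [if_pos rfl] at h ⊢
        simp only [Option.some.injEq, Prod.mk.injEq] at h
        obtain ⟨rfl, rfl⟩ := h
        simp
      · rw [if_neg h2] at h ⊢
        rw [Option.map_eq_some_iff] at h
        obtain ⟨⟨g1, r1⟩, hg, he⟩ := h
        simp only [Prod.mk.injEq] at he
        obtain ⟨rfl, rfl⟩ := he
        rw [ih _ _ _ _ _ _ (by omega) hg]
        simp
    · by_cases h3 : c = '('
      · subst h3
        rw [if_pos rfl]
        rw [pvGrab, if_neg (show ¬('(' = ')') from by decide), if_pos rfl] at h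
        rw [Option.map_eq_some_iff] at h
        obtain ⟨⟨g1, r1⟩, hg, he⟩ := h
        simp only [Prod.mk.injEq] at he
        obtain ⟨rfl, rfl⟩ := he
        rw [ih _ _ _ _ _ _ (by omega) hg]
        simp
      · rw [if_neg h3, if_neg h1]
        rw [pvGrab, if_neg h1, if_neg h3] at h
        rw [Option.map_eq_some_iff] at h
        obtain ⟨⟨g1, r1⟩, hg, he⟩ := h
        simp only [Prod.mk.injEq] at he
        obtain ⟨rfl, rfl⟩ := he
        rw [ih _ _ _ _ _ _ hd hg]
        simp

theorem pvBGo_grab_none (n0 : Nat) (u : List Char) : ∀ d out cur groups, 1 ≤ d →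
    pvGrab u d = none →
    pvBGo n0 u d out cur groups = (out ++ '(' :: (cur ++ u), groups) := by
  induction u with
  | nil => intro d out cur groups hd _; rw [pvBGo, if_pos (by omega)]; simp
  | cons c t ih =>
    intro d out cur groups hd h
    rw [pvBGo, if_neg (by omega)]
    by_cases h1 : c = ')'
    · subst h1
      rw [if_neg (by decide), if_pos rfl]
      rw [pvGrab, if_pos rfl] at h
      by_cases h2 : d = 1
      · rw [if_pos h2] at h; cases h
      · rw [if_neg h2] at h
        rw [Option.map_eq_none_iff] at h
        rw [if_neg h2, ih _ _ _ _ (by omega) h]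
        simp
    · by_cases h3 : c = '('
      · subst h3
        rw [if_pos rfl]
        rw [pvGrab, if_neg (show ¬('(' = ')') from by decide), if_pos rfl] at h
        rw [Option.map_eq_none_iff] at h
        rw [ih _ _ _ _ (by omega) h]
        simp
      · rw [if_neg h3, if_neg h1]
        rw [pvGrab, if_neg h1, if_neg h3] at h
        rw [Option.map_eq_none_iff] at h
        rw [ih _ _ _ _ hd h]
        simp

theorem pvBGo_fgs_none (n0 : Nat) (t : List Char) : ∀ out groups, pvFgs t = none →
    pvBGo n0 t 0 out [] groups = (out ++ t, groups) := by
  induction t with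
  | nil => intro out groups _; simp [pvBGo]
  | cons c u ih =>
    intro out groups h
    simp only [pvFgs] at h
    rw [pvBGo, if_pos rfl]
    split_ifs at h with h1
    · rw [Option.map_eq_none_iff] at h
      rw [if_pos h1, pvBGo_grab_none _ _ _ _ _ _ (by omega) h]
      simp [h1]
    · rw [Option.map_eq_none_iff] at h
      rw [if_neg h1, ih _ _ h]
      simp

theorem pvBGo_fgs_some (n0 : Nat) (t : List Char) : ∀ p g r out groups,
    pvFgs t = some (p, g, r) →
    pvBGo n0 t 0 out [] groups =
      pvBGo n0 r 0 (out ++ p ++ '@' :: PySem.Int.toChars ((n0 + groups.length : Nat) : Int))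
        [] (groups ++ [g]) := by
  induction t with
  | nil => intro p g r out groups h; simp [pvFgs] at h
  | cons c u ih =>
    intro p g r out groups h
    simp only [pvFgs] at h
    rw [pvBGo, if_pos rfl]
    split_ifs at h with h1
    · rw [Option.map_eq_some_iff] at h
      obtain ⟨⟨g1, r1⟩, hg, he⟩ := h
      simp only [Prod.mk.injEq] at he
      obtain ⟨rfl, rfl, rfl⟩ := he
      rw [if_pos h1, pvBGo_grab _ _ _ _ _ _ _ _ (by omega) hg]
      simp
    · rw [Option.map_eq_some_iff] at h
      obtain ⟨⟨p1, g1, r1⟩, hg, he⟩ := h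
      simp only [Prod.mk.injEq] at he
      obtain ⟨rfl, rfl, rfl⟩ := he
      rw [if_neg h1, ih _ _ _ _ _ hg]
      simp

theorem pvBGo_shift (n0 : Nat) (t : List Char) : ∀ d out cur (gs0 gs1 : List (List Char)),
    pvBGo n0 t d out cur (gs0 ++ gs1) =
      ((pvBGo (n0 + gs0.length) t d out cur gs1).1,
        gs0 ++ (pvBGo (n0 + gs0.length) t d out cur gs1).2) := by
  induction t with
  | nil => intro d out cur gs0 gs1; simp [pvBGo]
  | cons c t ih =>
    intro d out cur gs0 gs1
    rw [pvBGo, pvBGo]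
    split_ifs <;>
      first
      | (rw [List.append_assoc, ih]; simp [Nat.add_assoc])
      | rw [ih]

theorem pvLoopA (fuel : Nat) : ∀ (vl : List String) (i : Nat) (appe : Bool), i < vl.length →
    (vl.getD i "").toList.count '(' < fuel →
    pvExprLoop fuel i vl appe =
      ((vl.set i (String.ofList (pvBGo vl.length (vl.getD i "").toList 0 [] [] []).1)) ++
          (pvBGo vl.length (vl.getD i "").toList 0 [] [] []).2.map String.ofList,
        appe || decide (0 < (pvBGo vl.length (vl.getD i "").toList 0 [] [] []).2.length)) := by
  induction fuel with
  | zero => intro vl i appe hi hcnt; omega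
  | succ fuel ih =>
    intro vl i appe hi hcnt
    rw [pvExprLoop]
    rcases hfgs : pvFgs (vl.getD i "").toList with _ | ⟨p, g, r⟩
    · rw [pvEncl_eq_fgs, hfgs]
      rw [pvBGo_fgs_none _ _ _ _ hfgs]
      simp only [List.nil_append, List.map_nil, List.append_nil, List.length_nil]
      rw [List.getD_eq_getElem _ _ hi, String.ofList_toList, List.set_getElem_self]
      simp
    · obtain ⟨hdec, hp⟩ := pvFgs_sound _ _ _ _ hfgs
      rw [pvEncl_eq_fgs, hfgs]
      simp only [Option.map_some]
      set num := PySem.Int.toChars (vl.length : Int) with hnum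
      have hrepl : pvReplaceFirst (vl.getD i "").toList ('(' :: (g ++ [')']))
          ('@' :: num) = p ++ ('@' :: num) ++ r := by
        rw [hdec]
        exact pvReplaceFirst_decomp p g r _ hp
      set s' := p ++ ('@' :: num) ++ r with hs'
      set vl' := vl.set i (String.ofList s') ++ [String.ofList g] with hvl'
      have hlen' : vl'.length = vl.length + 1 := by simp [hvl']
      have hi' : i < vl'.length := by omega
      have hget' : (vl'.getD i "").toList = s' := by
        rw [hvl', List.getD_eq_getElem _ _ hi',
          List.getElem_append_left (by simpa using hi),
          List.getElem_set_self (by simpa using hi), String.toList_ofList]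
      have hnop : '(' ∉ ('@' :: num) := by
        simp only [List.mem_cons, not_or]
        exact ⟨by decide, by rw [hnum]; exact pvToChars_no_paren vl.length⟩
      have hppre : '(' ∉ (p ++ '@' :: num) := by
        simp only [List.mem_append, not_or]
        exact ⟨hp, by simpa using hnop⟩
      have hcnt' : (vl'.getD i "").toList.count '(' < fuel := by
        have e1 : s'.count '(' = r.count '(' := by
          rw [hs']
          simp [List.count_append, List.count_eq_zero.mpr hp,
            List.count_eq_zero.mpr (show '(' ∉ num from fun h =>
              hnop (List.mem_cons_of_mem _ h))]
        have e2 : (vl.getD i "").toList.count '(' =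
            p.count '(' + g.count '(' + r.count '(' + 1 := by
          rw [hdec]
          simp [List.count_append]
          omega
        rw [hget', e1]
        rw [e2] at hcnt
        omega
      rw [hrepl, ih vl' i true hi' hcnt']
      have hA : pvBGo vl'.length (vl'.getD i "").toList 0 [] [] [] =
          pvBGo (vl.length + 1) r 0 (p ++ '@' :: num) [] [] := by
        rw [hget', hs', hlen', pvBGo_prefix _ _ _ _ _ _ hppre]
        simp only [List.nil_append]
      have hB : pvBGo vl.length (vl.getD i "").toList 0 [] [] [] =
          ((pvBGo (vl.length + 1) r 0 (p ++ '@' :: num) [] []).1,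
            g :: (pvBGo (vl.length + 1) r 0 (p ++ '@' :: num) [] []).2) := by
        have hsh := pvBGo_shift vl.length r 0 (p ++ '@' :: num) [] [g] []
        rw [pvBGo_fgs_some _ _ _ _ _ _ _ hfgs]
        simp only [List.nil_append, List.length_nil, Nat.add_zero, ← hnum]
        simpa using hsh
      rw [hA, hB]
      rw [Prod.mk.injEq]
      constructor
      · rw [hvl', List.set_append_left _ _ (by simpa using hi), List.set_set]
        simp
      · simp

-- ===== VERDICT (by name: the statement is the Claim_ definition above) =====
theorem ExprSepaEncl_spec : Claim_equal_ExprSepaEncl := by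
  intro inde vl _ hpre
  show ExprSepaEncl inde vl = ExprSepaEncl_alt inde vl
  rcases Decidable.em (inde < 0) with hneg | hneg
  · have hb : 0 ≤ inde + (vl.length : Int) := by
      rcases hpre with ⟨h0, _⟩ | ⟨_, h1, _⟩
      · omega
      · omega
    rw [ExprSepaEncl, ExprSepaEncl_alt, if_pos hneg,
      dif_pos ⟨hb, by omega⟩, dif_pos ⟨hb, by omega⟩]
    have hi : (inde + (vl.length : Int)).toNat < vl.length := by omega
    rw [pvLoopA _ vl (inde + (vl.length : Int)).toNat false hi (by omega)]
    simp
  · have h1 : inde < (vl.length : Int) := by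
      rcases hpre with ⟨_, h1⟩ | ⟨h0, _, _⟩
      · exact h1
      · omega
    rw [ExprSepaEncl, ExprSepaEncl_alt, if_neg hneg,
      dif_pos ⟨by omega, h1⟩, dif_pos ⟨by omega, h1⟩]
    have hi : inde.toNat < vl.length := by omega
    rw [pvLoopA _ vl inde.toNat false hi (by omega)]
    simp
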